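-- pv_equiv track=rewrite | github.com/langerlad/mcaplikace | server_code/Export.py | vypocitej_net_flows
-- ===== SOURCE A (Python) =====
-- def vypocitej_net_flows(outranking_matrix, varianty):
--     """
--     Vypočítá Net Flow pro každou variantu na základě matice převahy.
--
--     Args:
--         outranking_matrix: Binární matice převahy
--         varianty: Seznam názvů variant
--
--     Returns:
--         list: Seznam dvojic (varianta, net_flow) seřazený sestupně podle net_flow
--     """
--     pocet_variant = len(varianty)
--     net_flows = []
--
--     for i in range(pocet_variant):
--         # Počet variant, které i převyšuje
--         vychazejici = sum(outranking_matrix[i])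
--
--         # Počet variant, které převyšují i
--         prichazejici = sum(outranking_matrix[j][i] for j in range(pocet_variant))
--
--         # Net Flow = vychazejici - prichazejici
--         net_flow = vychazejici - prichazejici
--         net_flows.append((varianty[i], net_flow))
--
--     # Seřazení podle net_flow sestupně
--     return sorted(net_flows, key=lambda x: x[1], reverse=True)
-- ===== SOURCE B (Python) =====
-- def _vloz_sestupne(x, ys):
--     """Insert x into the descending-sorted list ys, after every element whose
--     net flow is >= x's (keeps original order on ties, like a stable sort)."""
--     if not ys:
--         return [x]
--     y = ys[0]
--     if y[1] < x[1]:
--         return [x] + ys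
--     return [y] + _vloz_sestupne(x, ys[1:])
--
--
-- def vypocitej_net_flows(outranking_matrix, varianty):
--     """Single signed accumulator: each cell is added once to its row's variant
--     and subtracted once from its column's variant; the ranking is then built
--     incrementally by stable descending insertion (no call to sorted)."""
--     n = len(varianty)
--     net = [0] * n
--     for i in range(n):
--         row = outranking_matrix[i]
--         net[i] += sum(row)
--         for j in range(n):
--             net[j] -= row[j]
--     vysledek = []
--     for i in range(n):
--         vysledek = _vloz_sestupne((varianty[i], net[i]), vysledek)
--     return vysledek
-- ===== Notes on version B (the rewrite author's own statement) =====
-- stated objective: alternative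
-- what changed: A computes each variant's flow as full-row sum minus a fresh scan of its column and then calls sorted(reverse=True); B keeps one signed net accumulator (each cell is added once at its row index and subtracted once at its column index in a single pass) and builds the descending ranking incrementally by stable insertion, never calling sorted.
import Mathlib
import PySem

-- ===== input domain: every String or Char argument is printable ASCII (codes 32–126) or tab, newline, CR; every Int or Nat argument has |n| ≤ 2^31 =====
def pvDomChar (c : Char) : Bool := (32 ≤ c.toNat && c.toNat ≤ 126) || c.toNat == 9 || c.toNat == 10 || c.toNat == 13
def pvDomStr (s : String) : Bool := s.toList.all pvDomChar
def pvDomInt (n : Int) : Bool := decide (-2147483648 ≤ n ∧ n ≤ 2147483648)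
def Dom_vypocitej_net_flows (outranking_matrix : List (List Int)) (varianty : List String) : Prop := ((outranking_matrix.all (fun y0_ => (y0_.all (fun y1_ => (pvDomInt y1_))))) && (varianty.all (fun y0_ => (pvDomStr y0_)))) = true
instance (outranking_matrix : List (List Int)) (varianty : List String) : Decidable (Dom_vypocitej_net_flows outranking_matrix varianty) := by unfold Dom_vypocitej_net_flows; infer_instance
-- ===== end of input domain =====

-- B replaces A's per-variant column rescans and final sorted() call by one signed
-- accumulator pass (each cell added at its row, subtracted at its column) and an
-- incremental stable descending insertion (objective: alternative decomposition).

-- ===== PORT A =====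
-- literal transliteration of A: for each i, full-row sum minus a fresh scan of column i, then sort descending by net flow (stable)
def vypocitej_net_flows (outranking_matrix : List (List Int)) (varianty : List String) : List (String × Int) :=
  let pocet_variant := PySem.List.len varianty
  let net_flows : List (String × Int) :=
    (PySem.List.pyRange 0 pocet_variant 1).foldl (fun acc i =>
      let vychazejici := (PySem.List.pyGetD outranking_matrix i []).sum
      let prichazejici := ((PySem.List.pyRange 0 pocet_variant 1).map
        (fun j => PySem.List.pyGetD (PySem.List.pyGetD outranking_matrix j []) i 0)).sum
      let net_flow := vychazejici - prichazejici
      acc ++ [(PySem.List.pyGetD varianty i "", net_flow)]) []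
  PySem.List.sorted net_flows (fun x => x.2) true

-- ===== PORT B =====
-- _vloz_sestupne: insert after every element with net flow ≥ x's (stable, descending)
def pvVloz (x : String × Int) : List (String × Int) → List (String × Int)
  | [] => [x]
  | y :: ys => if y.2 < x.2 then x :: y :: ys else y :: pvVloz x ys

-- literal transliteration of B: one pass over cells updating a single signed net
-- accumulator, then incremental insertion builds the descending ranking
def vypocitej_net_flows_alt (outranking_matrix : List (List Int)) (varianty : List String) : List (String × Int) :=
  let n := PySem.List.len varianty
  let net :=
    (PySem.List.pyRange 0 n 1).foldl (fun net i =>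
      let row := PySem.List.pyGetD outranking_matrix i []
      let net := PySem.List.pySetD net i (PySem.List.pyGetD net i 0 + row.sum)
      (PySem.List.pyRange 0 n 1).foldl (fun net j =>
        PySem.List.pySetD net j (PySem.List.pyGetD net j 0 - PySem.List.pyGetD row j 0)) net)
      (List.replicate varianty.length 0)
  (PySem.List.pyRange 0 n 1).foldl (fun vysledek i =>
    pvVloz (PySem.List.pyGetD varianty i "", PySem.List.pyGetD net i 0) vysledek) []

-- ===== PRECONDITION & SPEC =====
-- Pre_ = exactly the inputs where Python A returns (no IndexError): the matrix has a row for
-- each variant and each of those rows has an entry for each variant.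
def Pre_vypocitej_net_flows (outranking_matrix : List (List Int)) (varianty : List String) : Prop :=
  varianty.length ≤ outranking_matrix.length ∧
  ∀ row ∈ outranking_matrix.take varianty.length, varianty.length ≤ row.length
instance (outranking_matrix : List (List Int)) (varianty : List String) : Decidable (Pre_vypocitej_net_flows outranking_matrix varianty) := by unfold Pre_vypocitej_net_flows; infer_instance

def pvWitness_vypocitej_net_flows : List (List Int) × List String :=
  ([[0, 1, 0], [0, 0, 1], [1, 1, 0]], ["a", "b", "c"])

def Spec_vypocitej_net_flows (outranking_matrix : List (List Int)) (varianty : List String) (out : List (String × Int)) : Prop := out = vypocitej_net_flows_alt outranking_matrix varianty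
instance (outranking_matrix : List (List Int)) (varianty : List String) (out : List (String × Int)) : Decidable (Spec_vypocitej_net_flows outranking_matrix varianty out) := by unfold Spec_vypocitej_net_flows; infer_instance

-- ===== CLAIM (what is proved, stated in full; the proofs are below) =====
def Claim_equal_vypocitej_net_flows : Prop := ∀ (outranking_matrix : List (List Int)) (varianty : List String), Dom_vypocitej_net_flows outranking_matrix varianty → Pre_vypocitej_net_flows outranking_matrix varianty → Spec_vypocitej_net_flows outranking_matrix varianty (vypocitej_net_flows outranking_matrix varianty)

-- ===== LEMMAS AND PROOFS =====

-- the hand-written insertion helper is PySem's insertBy with the descending test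
theorem pvVloz_eq_insertBy (x : String × Int) (ys : List (String × Int)) :
    pvVloz x ys = PySem.List.insertBy (fun a b => decide (b.2 < a.2)) x ys := by
  induction ys with
  | nil => rfl
  | cons y ys ih => simp [pvVloz, PySem.List.insertBy, ih]

-- the inner loop 'for j in range(K): net[j] -= row[j]' characterised entrywise
theorem pv_inner_fold (row : List Int) :
    ∀ (K : Nat) (cs : List Int),
      ((List.range K).foldl (fun cs j => cs.set j (cs.getD j 0 - row.getD j 0)) cs).length = cs.length ∧
      ∀ t, t < cs.length →
        ((List.range K).foldl (fun cs j => cs.set j (cs.getD j 0 - row.getD j 0)) cs).getD t 0 =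
          if t < K then cs.getD t 0 - row.getD t 0 else cs.getD t 0 := by
  intro K
  induction K with
  | zero => intro cs; simp
  | succ K ih =>
    intro cs
    obtain ⟨hlen, hget⟩ := ih cs
    rw [List.range_succ, List.foldl_append]
    set prev := (List.range K).foldl (fun cs j => cs.set j (cs.getD j 0 - row.getD j 0)) cs with hprev
    simp only [List.foldl_cons, List.foldl_nil]
    refine ⟨by simpa using hlen, ?_⟩
    intro t ht
    rw [List.getD_eq_getElem?_getD, List.getElem?_set]
    by_cases hK : K = t
    · subst hK
      have hlt : K < prev.length := by omega
      have : prev.getD K 0 = cs.getD K 0 := by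
        have := hget K ht
        simpa using this
      simp [hlt]
      simpa [List.getD_eq_getElem?_getD, List.getElem?_eq_getElem hlt] using this
    · rw [if_neg hK, ← List.getD_eq_getElem?_getD, hget t ht]
      by_cases h2 : t < K
      · rw [if_pos h2, if_pos (by omega)]
      · rw [if_neg h2, if_neg (by omega)]

-- the outer loop: after processing rows 0..R-1, net[t] carries row_t's sum (once row t
-- has been processed) minus the partial column sum of column t
theorem pv_outer_fold (m : List (List Int)) (n : Nat) :
    ∀ (R : Nat) (cs : List Int),
      ((List.range R).foldl
        (fun cs i => (List.range n).foldl
          (fun cs j => cs.set j (cs.getD j 0 - (m.getD i []).getD j 0))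
          (cs.set i (cs.getD i 0 + (m.getD i []).sum))) cs).length = cs.length ∧
      ∀ t, t < cs.length → t < n →
        ((List.range R).foldl
          (fun cs i => (List.range n).foldl
            (fun cs j => cs.set j (cs.getD j 0 - (m.getD i []).getD j 0))
            (cs.set i (cs.getD i 0 + (m.getD i []).sum))) cs).getD t 0 =
          cs.getD t 0 + (if t < R then (m.getD t []).sum else 0) -
            ((List.range R).map (fun i => (m.getD i []).getD t 0)).sum := by
  intro R
  induction R with
  | zero => intro cs; simp
  | succ R ih =>
    intro cs
    obtain ⟨hlen, hget⟩ := ih cs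
    rw [List.range_succ, List.foldl_append]
    set prev := (List.range R).foldl
      (fun cs i => (List.range n).foldl
        (fun cs j => cs.set j (cs.getD j 0 - (m.getD i []).getD j 0))
        (cs.set i (cs.getD i 0 + (m.getD i []).sum))) cs with hprev
    simp only [List.foldl_cons, List.foldl_nil]
    set b := prev.set R (prev.getD R 0 + (m.getD R []).sum) with hb
    obtain ⟨hlen2, hget2⟩ := pv_inner_fold (m.getD R []) n b
    have hblen : b.length = cs.length := by rw [hb]; simpa using hlen
    refine ⟨by rw [hlen2, hblen], ?_⟩
    intro t ht htn
    have htb : t < b.length := by omega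
    rw [hget2 t htb, if_pos htn]
    have hbget : b.getD t 0 =
        (if t = R then prev.getD R 0 + (m.getD R []).sum else prev.getD t 0) := by
      rw [hb, List.getD_eq_getElem?_getD, List.getElem?_set]
      by_cases hR : R = t
      · subst hR
        have : R < prev.length := by omega
        simp [this]
      · rw [if_neg hR, if_neg (fun h => hR h.symm), ← List.getD_eq_getElem?_getD]
    rw [hbget]
    rw [List.map_append, List.sum_append]
    simp only [List.map_cons, List.map_nil, List.sum_cons, List.sum_nil, add_zero]
    by_cases hRt : t = R
    · rw [if_pos hRt, hget R (by omega) (by omega), ← hRt]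
      split_ifs <;> omega
    · rw [if_neg hRt, hget t ht htn]
      split_ifs <;> omega

-- ===== VERDICT (by name: the statement is the Claim_ definition above) =====
theorem vypocitej_net_flows_spec : Claim_equal_vypocitej_net_flows := by
  intro m v _hdom _hpre
  unfold Spec_vypocitej_net_flows
  simp only [vypocitej_net_flows, vypocitej_net_flows_alt, PySem.List.len_eq,
    PySem.List.pyRange_zero_natCast,
    PySem.List.foldl_append_singleton_eq_map, List.nil_append,
    List.foldl_map, List.map_map,
    PySem.List.pySetD_natCast, PySem.List.pyGetD_natCast]
  rw [PySem.List.sorted_rev_eq_foldl_insertBy, List.foldl_map]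
  apply PySem.List.foldl_congr_mem
  intro acc k hk
  rw [List.mem_range] at hk
  rw [pvVloz_eq_insertBy]
  congr 2
  obtain ⟨hlen, hget⟩ := pv_outer_fold m v.length v.length (List.replicate v.length 0)
  rw [hget k (by simpa using hk) hk, if_pos hk]
  simp [Function.comp_def, PySem.List.pyGetD_natCast]
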